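-- pv_equiv track=rewrite | github.com/davidsok/leetcode | longestSubarrayWReplace.py | longestArrayWReplace
-- ===== SOURCE A (Python) =====
-- def longestArrayWReplace(arr, k) -> int:
--     window_start, count, window_length = 0, 0, 0
--     for window_end in range(len(arr)):
--         if arr[window_end] == 1:
--             count += 1
--         if window_end - window_start + 1 - count > k:
--             if arr[window_start] == 1:
--                 count -= 1
--             window_start += 1
--         window_length = max(window_length, window_end - window_start+1)
--     return window_length
-- ===== SOURCE B (Python) =====
-- def longestArrayWReplace(arr, k) -> int:
--     n = len(arr)
--     pz = [0]
--     z = 0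
--     for x in arr:
--         if x != 1:
--             z += 1
--         pz.append(z)
--
--     def ok(L):
--         for i in range(n - L + 1):
--             if pz[i + L] - pz[i] <= k:
--                 return True
--         return False
--
--     if not ok(0):
--         return 0
--     lo, hi = 0, n
--     while lo < hi:
--         mid = (lo + hi + 1) // 2
--         if ok(mid):
--             lo = mid
--         else:
--             hi = mid - 1
--     return lo
-- ===== Notes on version B (the rewrite author's own statement) =====
-- stated objective: alternative
-- what changed: Replaces A's one-pass sliding window with a two-stage algorithm: build a prefix-sum array of non-1 counts, then binary-search the largest window length L for which some length-L window needs at most k flips (the feasibility predicate is monotone in L).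
import Mathlib
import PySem

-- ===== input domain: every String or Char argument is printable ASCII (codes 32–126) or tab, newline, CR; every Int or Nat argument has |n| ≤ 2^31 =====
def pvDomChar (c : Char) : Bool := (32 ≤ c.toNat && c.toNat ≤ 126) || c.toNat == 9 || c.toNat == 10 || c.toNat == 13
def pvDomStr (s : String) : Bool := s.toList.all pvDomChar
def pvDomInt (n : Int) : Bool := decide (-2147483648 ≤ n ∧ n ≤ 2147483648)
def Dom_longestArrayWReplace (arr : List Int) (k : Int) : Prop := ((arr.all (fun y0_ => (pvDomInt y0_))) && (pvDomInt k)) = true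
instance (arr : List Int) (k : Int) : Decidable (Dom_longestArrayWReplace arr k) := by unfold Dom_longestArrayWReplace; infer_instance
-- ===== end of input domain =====

-- B replaces A's sliding window by prefix sums of non-1 counts plus a binary search
-- on the answer length (objective: alternative algorithm, similar cost).

-- ===== PORT A =====
-- loop body of A: state = (window_start, count, window_length)
def stepA (arr : List Int) (k : Int) (s : Int × Int × Int) (window_end : Int) : Int × Int × Int :=
  let count := if PySem.List.pyGetD arr window_end 0 == 1 then s.2.1 + 1 else s.2.1
  let ws := s.1
  let p : Int × Int :=
    if window_end - ws + 1 - count > k then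
      (ws + 1, if PySem.List.pyGetD arr ws 0 == 1 then count - 1 else count)
    else (ws, count)
  (p.1, p.2, max s.2.2 (window_end - p.1 + 1))

def longestArrayWReplace (arr : List Int) (k : Int) : Int :=
  ((PySem.List.pyRange 0 (PySem.List.len arr) 1).foldl (stepA arr k) (0, 0, 0)).2.2

-- ===== PORT B =====
-- building the prefix array pz: state = (pz, z); pz.append(z) after z += (0 if x == 1 else 1)
def pzStep (s : List Int × Int) (x : Int) : List Int × Int :=
  let z := if x == 1 then s.2 else s.2 + 1
  (s.1 ++ [z], z)

-- ok(L): some window of length L needs at most k flips (early-return loop = any;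
-- pz indices are in range for every L the program queries, so pyGetD is exact here)
def okB (pz : List Int) (n k L : Int) : Bool :=
  (PySem.List.pyRange 0 (n - L + 1) 1).any
    (fun i => decide (PySem.List.pyGetD pz (i + L) 0 - PySem.List.pyGetD pz i 0 ≤ k))

-- the while-loop of B's binary search (fuel = hi - lo bounds the iteration count;
-- it only makes the recursion structural and never changes the computed value)
def bsB (ok : Int → Bool) : Nat → Int → Int → Int
  | 0, lo, _ => lo
  | fuel + 1, lo, hi =>
    if lo < hi then
      let mid := PySem.Int.floordiv (lo + hi + 1) 2
      if ok mid then bsB ok fuel mid hi else bsB ok fuel lo (mid - 1)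
    else lo

def longestArrayWReplace_alt (arr : List Int) (k : Int) : Int :=
  let n := PySem.List.len arr
  let pz := (arr.foldl pzStep ([0], 0)).1
  if !(okB pz n k 0) then 0
  else bsB (okB pz n k) n.toNat 0 n

-- ===== PRECONDITION & SPEC =====
def Spec_longestArrayWReplace (arr : List Int) (k : Int) (out : Int) : Prop := out = longestArrayWReplace_alt arr k
instance (arr : List Int) (k : Int) (out : Int) : Decidable (Spec_longestArrayWReplace arr k out) := by unfold Spec_longestArrayWReplace; infer_instance

-- ===== CLAIM (what is proved, stated in full; the proofs are below) =====
def Claim_equal_longestArrayWReplace : Prop := ∀ (arr : List Int) (k : Int), Dom_longestArrayWReplace arr k → Spec_longestArrayWReplace arr k (longestArrayWReplace arr k)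

-- ===== LEMMAS AND PROOFS =====

-- number of elements ≠ 1 (flips needed) and number of elements = 1 in a list
def zc : List Int → Int
  | [] => 0
  | x :: t => (if x == 1 then 0 else 1) + zc t

def oc : List Int → Int
  | [] => 0
  | x :: t => (if x == 1 then 1 else 0) + oc t

-- the window arr[i : i+L]
def win (arr : List Int) (i L : Nat) : List Int := (arr.drop i).take L

-- some window of length L inside the prefix arr[:m] needs at most k flips
def feasP (arr : List Int) (k : Int) (m L : Nat) : Prop :=
  ∃ i : Nat, i + L ≤ m ∧ zc (win arr i L) ≤ k

theorem zc_nonneg (l : List Int) : 0 ≤ zc l := by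
  induction l with
  | nil => simp [zc]
  | cons x t ih => simp only [zc]; split <;> omega

theorem zc_append (a b : List Int) : zc (a ++ b) = zc a + zc b := by
  induction a with
  | nil => simp [zc]
  | cons x t ih => simp only [List.cons_append, zc, ih]; ring

theorem oc_append (a b : List Int) : oc (a ++ b) = oc a + oc b := by
  induction a with
  | nil => simp [oc]
  | cons x t ih => simp only [List.cons_append, oc, ih]; ring

theorem oc_add_zc (l : List Int) : oc l + zc l = (l.length : Int) := by
  induction l with
  | nil => simp [oc, zc]
  | cons x t ih => simp only [oc, zc, List.length_cons]; push_cast; split <;> omega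

theorem zc_take_mono (l : List Int) {a b : Nat} (h : a ≤ b) :
    zc (l.take a) ≤ zc (l.take b) := by
  have hb : b = a + (b - a) := by omega
  rw [hb, List.take_add, zc_append]
  have := zc_nonneg ((l.drop a).take (b - a))
  omega

theorem win_length (arr : List Int) (i L : Nat) (h : i + L ≤ arr.length) :
    (win arr i L).length = L := by
  simp [win, List.length_take, List.length_drop]
  omega

theorem win_zero (arr : List Int) (i : Nat) : win arr i 0 = [] := by simp [win]

theorem win_succ (arr : List Int) (w m : Nat) (hw : w ≤ m) (hm : m < arr.length) :
    win arr w (m + 1 - w) = win arr w (m - w) ++ [arr[m]] := by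
  have h1 : m + 1 - w = (m - w) + 1 := by omega
  rw [h1]
  unfold win
  rw [List.take_succ]
  congr 1
  have h2 : (arr.drop w)[m - w]? = arr[w + (m - w)]? := List.getElem?_drop ..
  rw [show w + (m - w) = m by omega] at h2
  rw [h2, List.getElem?_eq_getElem hm]
  rfl

theorem win_head (arr : List Int) (w m : Nat) (hw : w ≤ m) (hm : m < arr.length) :
    win arr w (m + 1 - w) = arr[w]'(by omega) :: win arr (w + 1) (m - w) := by
  unfold win
  rw [List.drop_eq_getElem_cons (by omega : w < arr.length),
      show m + 1 - w = (m - w) + 1 by omega, List.take_succ_cons]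

theorem zc_win_sub (arr : List Int) (i w L M : Nat) (hiw : i ≤ w) (hsum : i + L = w + M) :
    zc (win arr w M) ≤ zc (win arr i L) := by
  have hL : L = (w - i) + M := by omega
  unfold win
  rw [hL, List.take_add, zc_append, List.drop_drop, show i + (w - i) = w by omega]
  have := zc_nonneg ((arr.drop i).take (w - i))
  omega

theorem feasP_mono_m (arr : List Int) (k : Int) {m m' L : Nat} (h : m ≤ m') :
    feasP arr k m L → feasP arr k m' L := by
  rintro ⟨i, hi, hz⟩; exact ⟨i, by omega, hz⟩

theorem feasP_mono_L (arr : List Int) (k : Int) {m L M : Nat} (h : M ≤ L) :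
    feasP arr k m L → feasP arr k m M := by
  rintro ⟨i, hi, hz⟩
  refine ⟨i, by omega, le_trans ?_ hz⟩
  exact zc_take_mono (arr.drop i) h

theorem feasP_zero_iff (arr : List Int) (k : Int) (m : Nat) :
    feasP arr k m 0 ↔ 0 ≤ k := by
  constructor
  · rintro ⟨i, _, hz⟩
    simp [win_zero, zc] at hz
    omega
  · intro hk
    exact ⟨0, by omega, by simp [win_zero, zc]; omega⟩

-- ===== A's loop invariant: after m steps the state is (w, #1s in arr[w:m], m-w),
-- m-w is feasible (for k ≥ 0), no longer window inside arr[:m] is feasible,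
-- and for k < 0 the window is empty (w = m) =====
theorem A_inv (arr : List Int) (k : Int) (m : Nat) (hm : m ≤ arr.length) :
    ∃ w : Nat, w ≤ m ∧
      (PySem.List.pyRange 0 (m : Int) 1).foldl (stepA arr k) (0, 0, 0)
        = ((w : Int), oc (win arr w (m - w)), (m : Int) - (w : Int)) ∧
      (0 ≤ k → feasP arr k m (m - w)) ∧
      (∀ L : Nat, m - w < L → ¬ feasP arr k m L) ∧
      (k < 0 → w = m) := by
  induction m with
  | zero =>
    refine ⟨0, le_rfl, by simp [PySem.List.pyRange, win_zero, oc], ?_, ?_, fun _ => rfl⟩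
    · intro hk; exact (feasP_zero_iff arr k 0).mpr hk
    · rintro L hL ⟨i, hi, _⟩; omega
  | succ m ih =>
    obtain ⟨w, hw, hfold, hfeas, hmax, hneg⟩ := ih (by omega)
    have hmlen : m < arr.length := by omega
    have ha : PySem.List.pyGetD arr (m : Int) 0 = arr[m] := by
      rw [PySem.List.pyGetD_eq_getElem arr 0 (by positivity) (by exact_mod_cast hmlen)]
      simp
    have haw : PySem.List.pyGetD arr (w : Int) 0 = arr[w]'(by omega) := by
      rw [PySem.List.pyGetD_eq_getElem arr 0 (by positivity) (by exact_mod_cast (show w < arr.length by omega))]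
      simp
    have hcount : (if arr[m] == 1 then oc (win arr w (m - w)) + 1 else oc (win arr w (m - w)))
        = oc (win arr w (m + 1 - w)) := by
      rw [win_succ arr w m hw hmlen, oc_append]
      cases h : (arr[m] == 1) <;> simp [oc, h] <;> ring
    have hlen : ((win arr w (m + 1 - w)).length : Int) = (m : Int) + 1 - w := by
      rw [win_length arr w (m + 1 - w) (by omega)]; push_cast; omega
    have hcond : ((m : Int) - (w : Int) + 1 - oc (win arr w (m + 1 - w)) > k)
        ↔ zc (win arr w (m + 1 - w)) > k := by
      have h1 := oc_add_zc (win arr w (m + 1 - w))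
      rw [hlen] at h1
      omega
    have hfold' : (PySem.List.pyRange 0 (((m + 1 : Nat)) : Int) 1).foldl (stepA arr k) (0, 0, 0)
        = stepA arr k ((w : Int), oc (win arr w (m - w)), (m : Int) - (w : Int)) (m : Int) := by
      rw [show (((m + 1 : Nat)) : Int) = (m : Int) + 1 by push_cast; ring,
          PySem.List.pyRange_one_succ_right (by positivity), List.foldl_append, hfold]
      simp
    by_cases hz : zc (win arr w (m + 1 - w)) > k
    · -- slide: window start moves to w+1, size stays m-w
      refine ⟨w + 1, by omega, ?_, ?_, ?_, ?_⟩
      · rw [hfold']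
        simp only [stepA, ha, haw, hcount]
        rw [if_pos (hcond.mpr hz)]
        have h2 : oc (win arr w (m + 1 - w))
            = (if arr[w]'(by omega) == 1 then 1 else 0) + oc (win arr (w + 1) (m - w)) := by
          rw [win_head arr w m hw hmlen]; rfl
        have h3 : m + 1 - (w + 1) = m - w := by omega
        cases hx : (arr[w]'(by omega) == 1) <;>
          · simp only [hx] at h2 ⊢
            simp [h2, h3]
      · intro hk
        have := hfeas hk
        have h3 : m + 1 - (w + 1) = m - w := by omega
        rw [h3]
        exact feasP_mono_m arr k (by omega) this
      · intro L hL
        rintro ⟨i, hiL, hzi⟩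
        by_cases hend : i + L ≤ m
        · exact hmax L (by omega) ⟨i, hend, hzi⟩
        · have him : i + L = m + 1 := by omega
          have hiw : i ≤ w := by omega
          have := zc_win_sub arr i w L (m + 1 - w) hiw (by omega)
          omega
      · intro hk
        have := hneg hk
        omega
    · -- grow: window start stays, size becomes m+1-w; the current window is feasible
      have hk0 : 0 ≤ k := by
        have := zc_nonneg (win arr w (m + 1 - w))
        omega
      refine ⟨w, by omega, ?_, ?_, ?_, ?_⟩
      · rw [hfold']
        simp only [stepA, ha, haw, hcount]
        rw [if_neg (fun hc => hz (hcond.mp hc))]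
        simp
        omega
      · intro _
        exact ⟨w, by omega, by omega⟩
      · intro L hL
        rintro ⟨i, hiL, hzi⟩
        by_cases hend : i + L ≤ m
        · exact hmax L (by omega) ⟨i, hend, hzi⟩
        · have him : i + L = m + 1 := by omega
          have hL1 : m - w < L - 1 := by omega
          refine hmax (L - 1) hL1 ⟨i, by omega, ?_⟩
          calc zc (win arr i (L - 1)) ≤ zc (win arr i L) := zc_take_mono (arr.drop i) (by omega)
            _ ≤ k := hzi
      · intro hk; omega

-- ===== B's prefix array =====
def pzTail (z : Int) : List Int → List Int
  | [] => []
  | x :: t => (if x == 1 then z else z + 1) :: pzTail (if x == 1 then z else z + 1) t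

theorem pz_fold (xs : List Int) : ∀ (acc : List Int) (z : Int),
    xs.foldl pzStep (acc, z) = (acc ++ pzTail z xs, z + zc xs) := by
  induction xs with
  | nil => intro acc z; simp [pzTail, zc]
  | cons x t ih =>
    intro acc z
    simp only [List.foldl_cons, pzStep, pzTail, zc]
    rw [ih]
    cases h : (x == 1) <;> simp [h] <;> ring_nf <;> simp [List.append_assoc]

theorem pzTail_length (xs : List Int) : ∀ z : Int, (pzTail z xs).length = xs.length := by
  induction xs with
  | nil => intro z; rfl
  | cons x t ih => intro z; simp [pzTail, ih]

theorem pzTail_get (xs : List Int) : ∀ (z : Int) (j : Nat) (hj : j < xs.length),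
    (pzTail z xs)[j]'(by rw [pzTail_length]; exact hj) = z + zc (xs.take (j + 1)) := by
  induction xs with
  | nil => intro z j hj; simp at hj
  | cons x t ih =>
    intro z j hj
    cases j with
    | zero => cases h : (x == 1) <;> simp [pzTail, zc, h]
    | succ j =>
      have hj' : j < t.length := by simpa using hj
      simp only [pzTail, List.getElem_cons_succ, List.take_succ_cons, zc]
      rw [ih _ j hj']
      cases h : (x == 1) <;> simp [h] <;> ring

theorem pz_get (arr : List Int) (i : Nat) (hi : i ≤ arr.length) :
    PySem.List.pyGetD ((0 : Int) :: pzTail 0 arr) (i : Int) 0 = zc (arr.take i) := by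
  have hlen : i < ((0 : Int) :: pzTail 0 arr).length := by
    simp [pzTail_length]; omega
  rw [PySem.List.pyGetD_eq_getElem _ 0 (by positivity) (by exact_mod_cast hlen)]
  simp only [Int.toNat_natCast]
  cases i with
  | zero => simp [zc]
  | succ j =>
    have hj : j < arr.length := by omega
    simp only [List.getElem_cons_succ]
    rw [pzTail_get arr 0 j hj]
    simp

-- okB on the real prefix array decides feasibility over the whole array
theorem okB_spec (arr : List Int) (k : Int) (L : Nat) (hL : L ≤ arr.length) :
    okB ((0 : Int) :: pzTail 0 arr) (arr.length : Int) k (L : Int) = true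
      ↔ feasP arr k arr.length L := by
  unfold okB
  rw [List.any_eq_true]
  constructor
  · rintro ⟨i, hmem, hp⟩
    rw [PySem.List.mem_pyRange_one] at hmem
    obtain ⟨hi0, hi1⟩ := hmem
    set j := i.toNat with hjdef
    have hij : (j : Int) = i := Int.toNat_of_nonneg hi0
    have hjL : j + L ≤ arr.length := by omega
    refine ⟨j, hjL, ?_⟩
    rw [show i + (L : Int) = ((j + L : Nat) : Int) by push_cast; omega] at hp
    rw [← hij] at hp
    rw [pz_get arr (j + L) hjL, pz_get arr j (by omega)] at hp
    have hsplit : arr.take (j + L) = arr.take j ++ (arr.drop j).take L := List.take_add ..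
    rw [hsplit, zc_append] at hp
    simp at hp
    unfold win
    omega
  · rintro ⟨j, hjL, hz⟩
    refine ⟨(j : Int), ?_, ?_⟩
    · rw [PySem.List.mem_pyRange_one]
      constructor <;> [positivity; (push_cast; omega)]
    · rw [show (j : Int) + (L : Int) = ((j + L : Nat) : Int) by push_cast; ring]
      rw [pz_get arr (j + L) hjL, pz_get arr j (by omega)]
      have hsplit : arr.take (j + L) = arr.take j ++ (arr.drop j).take L := List.take_add ..
      rw [hsplit, zc_append]
      unfold win at hz
      simp
      omega

theorem okB_false_of_gt (pz : List Int) (n k L : Int) (h : n < L) :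
    okB pz n k L = false := by
  unfold okB
  rw [List.any_eq_false]
  intro i hmem
  rw [PySem.List.mem_pyRange_one] at hmem
  omega

-- unfolding equations for the binary-search loop
theorem bsB_succ_lt (ok : Int → Bool) (fuel : Nat) (lo hi : Int) (h : lo < hi) :
    bsB ok (fuel + 1) lo hi = if ok (PySem.Int.floordiv (lo + hi + 1) 2)
      then bsB ok fuel (PySem.Int.floordiv (lo + hi + 1) 2) hi
      else bsB ok fuel lo (PySem.Int.floordiv (lo + hi + 1) 2 - 1) := by
  simp [bsB, h]

theorem bsB_ge (ok : Int → Bool) (fuel : Nat) (lo hi : Int) (h : ¬ lo < hi) :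
    bsB ok fuel lo hi = lo := by
  cases fuel <;> simp [bsB, h]

-- binary-search correctness for a downward-monotone predicate
theorem bsB_spec (ok : Int → Bool)
    (mono : ∀ a b : Int, 0 ≤ a → a ≤ b → ok b = true → ok a = true) :
    ∀ (fuel : Nat) (lo hi : Int), (hi - lo).toNat ≤ fuel → 0 ≤ lo → lo ≤ hi → ok lo = true →
      lo ≤ bsB ok fuel lo hi ∧ bsB ok fuel lo hi ≤ hi ∧ ok (bsB ok fuel lo hi) = true ∧
        ∀ L : Int, bsB ok fuel lo hi < L → L ≤ hi → ok L = false := by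
  intro fuel
  induction fuel with
  | zero =>
    intro lo hi hN h0 hle hok
    have h : ¬ lo < hi := by omega
    rw [bsB_ge ok 0 lo hi h]
    exact ⟨le_rfl, hle, hok, fun L hL1 hL2 => by omega⟩
  | succ n ihN =>
    intro lo hi hN h0 hle hok
    by_cases h : lo < hi
    · have hb := PySem.Int.floordiv_two_mid_bounds (lo := lo + 1) (hi := hi) (by omega)
      rw [show lo + 1 + hi = lo + hi + 1 by ring] at hb
      set mid := PySem.Int.floordiv (lo + hi + 1) 2 with hmid
      rw [bsB_succ_lt ok n lo hi h, ← hmid]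
      by_cases hm : ok mid = true
      · rw [if_pos hm]
        have := ihN mid hi (by omega) (by omega) (by omega) hm
        exact ⟨by omega, this.2.1, this.2.2.1, this.2.2.2⟩
      · rw [if_neg hm]
        obtain ⟨r1, r2, r3, r4⟩ := ihN lo (mid - 1) (by omega) h0 (by omega) hok
        refine ⟨r1, by omega, r3, ?_⟩
        intro L hL hLhi
        by_cases hcase : L ≤ mid - 1
        · exact r4 L hL hcase
        · cases hol : ok L with
          | false => rfl
          | true => exact absurd (mono mid L (by omega) (by omega) hol) hm
    · rw [bsB_ge ok (n + 1) lo hi h]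
      exact ⟨le_rfl, hle, hok, fun L hL1 hL2 => by omega⟩

-- ===== VERDICT (by name: the statement is the Claim_ definition above) =====
theorem longestArrayWReplace_spec : Claim_equal_longestArrayWReplace := by
  intro arr k _
  unfold Spec_longestArrayWReplace longestArrayWReplace longestArrayWReplace_alt
  obtain ⟨w, hw, hfold, hfeas, hmax, hneg⟩ := A_inv arr k arr.length le_rfl
  have hpz : (arr.foldl pzStep ([0], 0)).1 = (0 : Int) :: pzTail 0 arr := by
    rw [pz_fold]; rfl
  have hA : ((PySem.List.pyRange 0 ((arr.length : Nat) : Int) 1).foldl (stepA arr k) (0, 0, 0)).2.2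
      = (arr.length : Int) - (w : Int) := by rw [hfold]
  rw [PySem.List.len_eq, hA, hpz]
  set pz := (0 : Int) :: pzTail 0 arr with hpzdef
  have hok0 : okB pz (arr.length : Int) k 0 = true ↔ 0 ≤ k := by
    rw [show (0 : Int) = ((0 : Nat) : Int) by simp]
    rw [okB_spec arr k 0 (by omega)]
    exact feasP_zero_iff arr k arr.length
  by_cases hk : 0 ≤ k
  · rw [if_neg (by simp [hok0.mpr hk])]
    have mono : ∀ a b : Int, 0 ≤ a → a ≤ b → okB pz (arr.length : Int) k b = true →
        okB pz (arr.length : Int) k a = true := by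
      intro a b ha hab hb
      by_cases hbn : b ≤ (arr.length : Int)
      · have hbnat : b = ((b.toNat : Nat) : Int) := by omega
        have hanat : a = ((a.toNat : Nat) : Int) := by omega
        rw [hbnat] at hb
        rw [okB_spec arr k b.toNat (by omega)] at hb
        rw [hanat, okB_spec arr k a.toNat (by omega)]
        exact feasP_mono_L arr k (by omega) hb
      · rw [okB_false_of_gt pz (arr.length : Int) k b (by omega)] at hb
        exact absurd hb (by simp)
    obtain ⟨r1, r2, r3, r4⟩ := bsB_spec (okB pz (arr.length : Int) k) mono
      (arr.length : Int).toNat 0 (arr.length : Int) (by omega) le_rfl (by omega)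
      (hok0.mpr hk)
    set r := bsB (okB pz (arr.length : Int) k) (arr.length : Int).toNat 0 (arr.length : Int) with hr
    -- A's answer a = |arr| - w is feasible and maximal; so is r; hence equal
    have hA_ok : okB pz (arr.length : Int) k ((arr.length - w : Nat) : Int) = true := by
      rw [okB_spec arr k (arr.length - w) (by omega)]
      exact hfeas hk
    have hr_feas : feasP arr k arr.length r.toNat := by
      have hrn : r = ((r.toNat : Nat) : Int) := by omega
      rw [hrn] at r3
      exact (okB_spec arr k r.toNat (by omega)).mp r3
    have h1 : ¬ ((arr.length - w : Nat) : Int) > r := by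
      intro hgt
      have := r4 ((arr.length - w : Nat) : Int) hgt (by push_cast; omega)
      rw [this] at hA_ok
      exact absurd hA_ok (by simp)
    have h2 : ¬ (arr.length - w) < r.toNat := by
      intro hlt
      exact hmax r.toNat hlt hr_feas
    push_cast at h1
    omega
  · rw [if_pos ?_]
    · have hwm := hneg (by omega)
      subst hwm
      omega
    · simp only [Bool.not_eq_true']
      rw [← Bool.not_eq_true, hok0]
      omega
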